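-- pv_equiv track=rewrite | github.com/robert-vetter/School-Projects | Olympiads/2023/BWInf2023/Runde 2/Aufgabe 3/BWInf_3.py | gns_element
-- ===== SOURCE A (Python) =====
-- def gns_element(liste):
--     '''Gibt das größte, nicht sortierte Element einer Liste zurück, die nach unten aufsteigend sortiert werden soll'''
--     groesste = 0
--     gns = 0
--     for i in range(len(liste)):
--         if liste[i] >= groesste:
--             groesste = liste[i]
--         else:
--             if liste[i] >= gns:
--                 gns = liste[i]
--     return gns
-- ===== SOURCE B (Python) =====
-- def _prefixes(liste, cur):
--     """For each position, the running max (seeded with cur) of strictly earlier elements."""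
--     out = []
--     for x in liste:
--         out.append(cur)
--         cur = max(cur, x)
--     return out
--
--
-- def gns_element(liste):
--     '''Gibt das größte, nicht sortierte Element einer Liste zurück, die nach unten aufsteigend sortiert werden soll'''
--     prefix = _prefixes(liste, 0)
--     bad = [x for x, pm in zip(liste, prefix) if x < pm]
--     return max([0] + bad)
-- ===== Notes on version B (the rewrite author's own statement) =====
-- stated objective: alternative
-- what changed: Replaces the single stateful loop carrying both the running max and the answer with a two-phase decomposition: first compute the prefix-maximum table (floored at 0), then take the max of 0 and the elements smaller than their prefix maximum.
import Mathlib
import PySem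

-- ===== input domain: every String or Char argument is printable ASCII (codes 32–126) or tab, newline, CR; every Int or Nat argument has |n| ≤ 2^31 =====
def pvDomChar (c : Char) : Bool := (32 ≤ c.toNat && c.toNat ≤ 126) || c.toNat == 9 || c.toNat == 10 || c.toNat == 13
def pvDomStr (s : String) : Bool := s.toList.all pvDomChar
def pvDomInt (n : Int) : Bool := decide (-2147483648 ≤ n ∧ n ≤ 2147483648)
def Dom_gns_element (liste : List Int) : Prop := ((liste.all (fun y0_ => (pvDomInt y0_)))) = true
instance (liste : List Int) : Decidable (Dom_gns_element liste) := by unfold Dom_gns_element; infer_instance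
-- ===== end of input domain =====

-- B replaces A's single stateful loop with a prefix-maximum table plus a separate filter-and-max pass (alternative decomposition, same cost).


-- ===== PORT A =====
-- A's for-loop over indices, carrying (groesste, gns); iterating the list directly visits the same elements in order.
def gns_element (liste : List Int) : Int :=
  (liste.foldl
    (fun (st : Int × Int) x =>
      if x ≥ st.1 then (x, st.2)
      else if x ≥ st.2 then (st.1, x)
      else st)
    (0, 0)).2

-- ===== PORT B =====
-- _prefixes from Source B: loop appending the running max so far, then updating it.
def pvPrefixes (liste : List Int) (cur : Int) : List Int :=
  (liste.foldl (fun (p : List Int × Int) x => (p.1 ++ [p.2], max p.2 x)) ([], cur)).1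

def gns_element_alt (liste : List Int) : Int :=
  let pmax := pvPrefixes liste 0
  let bad := ((liste.zip pmax).filter (fun p => p.1 < p.2)).map (fun p => p.1)
  -- max([0] + bad): fold max over the list, starting at its head 0
  bad.foldl (fun m x => max m x) 0

-- ===== PRECONDITION & SPEC =====
def Spec_gns_element (liste : List Int) (out : Int) : Prop := out = gns_element_alt liste
instance (liste : List Int) (out : Int) : Decidable (Spec_gns_element liste out) := by unfold Spec_gns_element; infer_instance

-- ===== CLAIM (what is proved, stated in full; the proofs are below) =====
def Claim_equal_gns_element : Prop := ∀ (liste : List Int), Dom_gns_element liste → Spec_gns_element liste (gns_element liste)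

-- ===== LEMMAS AND PROOFS =====
-- recursive characterisation of the _prefixes loop
def pvPrefixesRec : List Int → Int → List Int
  | [], _ => []
  | x :: xs, cur => cur :: pvPrefixesRec xs (max cur x)

theorem pvPrefixes_eq_rec (l : List Int) : ∀ (cur : Int) (acc : List Int),
    (l.foldl (fun (p : List Int × Int) x => (p.1 ++ [p.2], max p.2 x)) (acc, cur)).1
      = acc ++ pvPrefixesRec l cur := by
  induction l with
  | nil => intro cur acc; simp [pvPrefixesRec]
  | cons x xs ih => intro cur acc; simp [pvPrefixesRec, ih]

theorem gns_core (l : List Int) :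
    ∀ (g s : Int),
    (l.foldl
      (fun (st : Int × Int) x =>
        if x ≥ st.1 then (x, st.2)
        else if x ≥ st.2 then (st.1, x)
        else st)
      (g, s)).2
    = ((l.zip (pvPrefixesRec l g)).filter (fun p => p.1 < p.2)).foldl (fun m p => max m p.1) s := by
  induction l with
  | nil => intro g s; simp [pvPrefixesRec]
  | cons x xs ih =>
    intro g s
    simp only [pvPrefixesRec, List.zip_cons_cons, List.filter_cons, List.foldl_cons]
    by_cases h : x ≥ g
    · have hg : max g x = x := by omega
      simp [h, show ¬ (x < g) by omega, ih]
    · have hg : max g x = g := by omega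
      have hx : x < g := by omega
      by_cases h2 : x ≥ s
      · have hs : max s x = x := by omega
        simp [h, h2, hg, hx, ih]
      · -- keep branch
        have hs : max s x = s := by omega
        simp [h, h2, hg, hx, ih, hs]

-- ===== VERDICT (by name: the statement is the Claim_ definition above) =====
theorem gns_element_spec : Claim_equal_gns_element := by
  intro liste _
  unfold Spec_gns_element gns_element gns_element_alt
  rw [gns_core, List.foldl_map, show pvPrefixes liste 0 = pvPrefixesRec liste 0 from by simpa using pvPrefixes_eq_rec liste 0 []]
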